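-- pv_equiv track=rewrite | github.com/gaming-hacker/jburkardt_python | partial_digest/partial_digest.py | find_distances
-- ===== SOURCE A (Python) =====
-- def find_distances ( l_length, l, x_length, x, y ):
--
-- #*****************************************************************************80
-- #
-- ## find_distances() determines if the "free" distances include every ||X(I)-Y||.
-- #
-- #  Discussion:
-- #
-- #    This routine is given a candidate point Y, a set of placed points
-- #    X(1:X_LENGTH), and a list of unused or "free" distances in
-- #    L(1:L_LENGTH).  The routine seeks to find in L a copy of the
-- #    distance from Y to each X.
-- #
-- #    If so, then the L array is reordered so that entries
-- #    L(L_LENGTH-X_LENGTH+1:L_LENGTH) contain theses distances.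
-- #
-- #    In other words, Y can be added into X, and L_LENGTH reduced to
-- #    L_LENGTH-X_LENGTH.
-- #
-- #  Licensing:
-- #
-- #    This code is distributed under the GNU LGPL license.
-- #
-- #  Modified:
-- #
-- #    10 January 2018
-- #
-- #  Author:
-- #
-- #    John Burkardt
-- #
-- #  Reference:
-- #
-- #    Pavel Pevzner,
-- #    Computational Molecular Biology,
-- #    MIT Press, 2000,
-- #    ISBN: 0-262-16197-4,
-- #    LC: QH506.P47.
-- #
-- #  Input:
-- #
-- #    integer L_LENGTH, the length of the array.
-- #
-- #    Input/integer L(L_LENGTH), the array.  On output,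
-- #    some entries have been shuffled.  In particular, if SUCCESS is TRUE,
-- #    the entries L(L_LENGTH-X_LENGTH+1:L_LENGTH) contain the distances
-- #    of X(1:X_LENGTH) to Y.
-- #
-- #    integer X_LENGTH, the number of entries in X.
-- #
-- #    integer X(X_LENGTH), the number of points
-- #    already accepted.
-- #
-- #    integer Y, a new point that we are considering.
-- #
-- #  Output:
-- #
-- #    logical SUCCESS, is TRUE if the entries of L included
-- #    the values of the distance of Y to each entry of X.
-- #
--   l2_length = l_length
--
--   for i in range ( 0, x_length ):
--
--     d = abs ( x[i] - y )
--
--     success = False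
--
--     for j in range ( 0, l2_length ):
--
--       if ( l[j] == d ):
--         l[j] = l[l2_length-1]
--         l[l2_length-1] = d
--         l2_length = l2_length - 1
--         success = True
--         break
--
--     if ( not success ):
--       return success, l
--
--   success = True
--
--   return success, l
-- ===== SOURCE B (Python) =====
-- def find_distances(l_length, l, x_length, x, y):
--     # Per-value position index: build a dict value -> set of active positions once,
--     # then each step picks min(positions[d]) instead of scanning the array prefix.
--     pos = {}
--     n = l_length
--     for j in range(n):
--         pos.setdefault(l[j], set()).add(j)
--     for i in range(x_length):
--         d = abs(x[i] - y)
--         s = pos.get(d)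
--         if not s:
--             return False, l
--         j = min(s)
--         s.remove(j)
--         v = l[n - 1]
--         pos[v].discard(n - 1)
--         if j < n - 1:
--             pos[v].add(j)
--         l[j] = v
--         l[n - 1] = d
--         n -= 1
--     return True, l
-- ===== Notes on version B (the rewrite author's own statement) =====
-- stated objective: alternative
-- what changed: A's inner linear scan of the active prefix for each distance is replaced by a per-value position index built once (dict value -> set of active positions): each step takes min(positions[d]) as the first match and updates the two affected position sets to mirror the swap-to-end, so no array scan remains; it trades the scan for index upkeep (not measured faster on random inputs).
-- outside the precondition, e.g. on find_distances(5, [1], 0, [], 0): A returns (True, [1]), B raises IndexError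
import Mathlib
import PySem

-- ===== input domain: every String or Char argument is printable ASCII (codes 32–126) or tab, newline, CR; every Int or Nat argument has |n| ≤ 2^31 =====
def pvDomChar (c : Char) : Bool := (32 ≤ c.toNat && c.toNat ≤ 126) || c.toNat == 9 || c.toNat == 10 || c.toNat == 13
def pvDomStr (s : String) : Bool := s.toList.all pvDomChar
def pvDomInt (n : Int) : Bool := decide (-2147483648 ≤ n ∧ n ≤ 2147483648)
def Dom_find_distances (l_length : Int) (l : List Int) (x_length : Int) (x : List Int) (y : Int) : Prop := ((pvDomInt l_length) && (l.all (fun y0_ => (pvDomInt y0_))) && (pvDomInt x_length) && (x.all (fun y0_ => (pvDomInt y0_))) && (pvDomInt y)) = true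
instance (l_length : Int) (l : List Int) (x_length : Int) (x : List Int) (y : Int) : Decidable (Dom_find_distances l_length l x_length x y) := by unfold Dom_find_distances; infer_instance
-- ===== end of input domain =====

-- B replaces A's inner scan of the active prefix by a per-value position index (dict value ->
-- set of active positions) built once; each step takes min(positions[d]) as the first match and
-- updates the two affected position sets to mirror the swap-to-end. Equivalence is about the
-- RETURN value; A also mutates l in place, and Source B reproduces that mutation before returning.

-- ===== PORT A =====
-- outer loop of A: i counts from 0, fuel = remaining iterations of range(0, x_length)
def pvGoA (x : List Int) (y : Int) : List Int → Int → Nat → Nat → Bool × List Int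
  | l, _, _, 0 => (true, l)
  | l, l2, i, fuel+1 =>
    let d : Int := |x.getD i 0 - y|
    -- inner loop: first j in range(0, l2_length) with l[j] == d
    match (List.range l2.toNat).find? (fun j => l.getD j 0 == d) with
    | none => (false, l)
    | some j =>
      pvGoA x y ((l.set j (l.getD (l2.toNat - 1) 0)).set (l2.toNat - 1) d) (l2 - 1) (i+1) fuel

def find_distances (l_length : Int) (l : List Int) (x_length : Int) (x : List Int) (y : Int) : Bool × List Int :=
  pvGoA x y l l_length 0 x_length.toNat

-- ===== PORT B =====
-- for j in range(l_length): pos.setdefault(l[j], set()).add(j)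
def pvBuildPos (l : List Int) (n : Int) : PySem.Dict Int (PySem.Set Int) :=
  (List.range n.toNat).foldl
    (fun pos j => pos.insert (l.getD j 0) (PySem.Set.add (pos.getD (l.getD j 0) PySem.Set.empty) (j : Int)))
    PySem.Dict.empty

-- main loop of B: i counts from 0, fuel = remaining iterations of range(0, x_length)
def pvGoB (x : List Int) (y : Int) : List Int → Int → PySem.Dict Int (PySem.Set Int) → Nat → Nat → Bool × List Int
  | l, _, _, _, 0 => (true, l)
  | l, n, pos, i, fuel+1 =>
    let d : Int := |x.getD i 0 - y|
    let s := pos.getD d PySem.Set.empty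
    if s = [] then (false, l)
    else
      match PySem.List.min? s (fun z => z) with
      | none => (false, l)   -- unreachable: s ≠ []
      | some j =>
        let pos1 := pos.insert d (PySem.Set.discard s j)   -- s.remove(j): j = min(s) ∈ s, so remove = discard
        let v := l.getD (n-1).toNat 0
        let pos2 := pos1.insert v (PySem.Set.discard (pos1.getD v PySem.Set.empty) (n-1))
        let pos3 := if j < n - 1 then pos2.insert v (PySem.Set.add (pos2.getD v PySem.Set.empty) j) else pos2
        pvGoB x y ((l.set j.toNat v).set (n-1).toNat d) (n-1) pos3 (i+1) fuel

def find_distances_alt (l_length : Int) (l : List Int) (x_length : Int) (x : List Int) (y : Int) : Bool × List Int :=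
  pvGoB x y l l_length (pvBuildPos l l_length) 0 x_length.toNat

-- ===== PRECONDITION & SPEC =====
-- Pre_ is exactly the inputs on which A returns, minus one corner where B's natural index build
-- raises: (i) l_length ≤ len(l) — beyond it A's scan/swap raises IndexError whenever it processes
-- a point, and on the x_length ≤ 0 remainder A returns (True, l) untouched while B raises building
-- the index, so that corner is excluded too; (ii) A reads x[i] for i ever reached, so with
-- x_length > len(x) A returns only if the search fails at some i < len(x) — availability of each
-- distance is the static multiset condition 'count of |x[i]-y| among the first i+1 distances
-- exceeds its count in l[:l_length]' (no simulation: counts over the inputs).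
def Pre_find_distances (l_length : Int) (l : List Int) (x_length : Int) (x : List Int) (y : Int) : Prop :=
  l_length ≤ (l.length : Int) ∧
    (x_length ≤ (x.length : Int) ∨
      ((List.range x.length).any (fun i =>
        (l.take l_length.toNat).count (|x.getD i 0 - y|) <
          ((x.take (i+1)).map (fun t => |t - y|)).count (|x.getD i 0 - y|))) = true)
instance (l_length : Int) (l : List Int) (x_length : Int) (x : List Int) (y : Int) : Decidable (Pre_find_distances l_length l x_length x y) := by unfold Pre_find_distances; infer_instance

def pvWitness_find_distances : Int × List Int × Int × List Int × Int := (4, [1,2,3,4], 2, [5,7], 4)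

def Spec_find_distances (l_length : Int) (l : List Int) (x_length : Int) (x : List Int) (y : Int) (out : Bool × List Int) : Prop := out = find_distances_alt l_length l x_length x y
instance (l_length : Int) (l : List Int) (x_length : Int) (x : List Int) (y : Int) (out : Bool × List Int) : Decidable (Spec_find_distances l_length l x_length x y out) := by unfold Spec_find_distances; infer_instance

-- ===== CLAIM (what is proved, stated in full; the proofs are below) =====
def Claim_equal_find_distances : Prop := ∀ (l_length : Int) (l : List Int) (x_length : Int) (x : List Int) (y : Int), Dom_find_distances l_length l x_length x y → Pre_find_distances l_length l x_length x y → Spec_find_distances l_length l x_length x y (find_distances l_length l x_length x y)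

-- ===== LEMMAS AND PROOFS =====

-- the loop invariant: pos maps each value v to exactly the set of active positions of v in l
def PvInv (pos : PySem.Dict Int (PySem.Set Int)) (l : List Int) (n : Int) : Prop :=
  ∀ (v k : Int), k ∈ pos.getD v PySem.Set.empty ↔ 0 ≤ k ∧ k < n ∧ l.getD k.toNat 0 = v

lemma pv_build_aux (l : List Int) (m : Nat) (v k : Int) :
    k ∈ ((List.range m).foldl
      (fun pos j => pos.insert (l.getD j 0) (PySem.Set.add (pos.getD (l.getD j 0) PySem.Set.empty) (j : Int)))
      PySem.Dict.empty).getD v PySem.Set.empty ↔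
    0 ≤ k ∧ k < (m : Int) ∧ l.getD k.toNat 0 = v := by
  induction m generalizing v k with
  | zero => simp [PySem.Dict.getD_empty, PySem.Set.empty]; omega
  | succ m ih =>
    rw [List.range_succ, List.foldl_append]
    simp only [List.foldl_cons, List.foldl_nil]
    rw [PySem.Dict.getD_insert]
    by_cases hv : v = l.getD m 0
    · subst hv
      rw [if_pos rfl, PySem.Set.mem_add, ih]
      constructor
      · rintro (⟨h0, h1, h2⟩ | rfl)
        · exact ⟨h0, by omega, h2⟩
        · exact ⟨by omega, by omega, by simp⟩
      · rintro ⟨h0, h1, h2⟩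
        by_cases hk : k = (m : Int)
        · right; exact hk
        · left; exact ⟨h0, by omega, h2⟩
    · rw [if_neg hv, ih]
      constructor
      · rintro ⟨h0, h1, h2⟩; exact ⟨h0, by omega, h2⟩
      · rintro ⟨h0, h1, h2⟩
        refine ⟨h0, ?_, h2⟩
        rcases lt_or_ge k (m : Int) with h | h
        · exact h
        · exfalso
          have hk : k = (m : Int) := by omega
          subst hk
          simp at h2
          exact hv h2.symm

lemma pv_build_inv (l : List Int) (n : Int) : PvInv (pvBuildPos l n) l n := by
  intro v k
  unfold pvBuildPos
  rw [pv_build_aux]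
  constructor
  · rintro ⟨a, b, c⟩; exact ⟨a, by omega, c⟩
  · rintro ⟨a, b, c⟩; exact ⟨a, by omega, c⟩

lemma pv_find_range_none (n : Nat) (p : Nat → Bool) (h : ∀ k < n, p k = false) :
    (List.range n).find? p = none := by
  rw [List.find?_eq_none]
  intro x hx
  simp only [List.mem_range] at hx
  simp [h x hx]

lemma pv_find_range_some (n : Nat) (p : Nat → Bool) (m : Nat) (hm : m < n) (hp : p m = true)
    (hmin : ∀ k < m, p k = false) : (List.range n).find? p = some m := by
  induction n with
  | zero => omega
  | succ n ih =>
    rw [List.range_succ, List.find?_append]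
    rcases lt_or_ge m n with h | h
    · rw [ih h]; rfl
    · have hmn : m = n := by omega
      subst hmn
      rw [pv_find_range_none m p hmin]
      simp [hp]

-- A's inner scan over range(0, l2_length) equals min over the position set of d
lemma pv_scan_eq_min (pos : PySem.Dict Int (PySem.Set Int)) (l : List Int) (n : Int)
    (hinv : PvInv pos l n) (d : Int) :
    (List.range n.toNat).find? (fun j => l.getD j 0 == d) =
      (PySem.List.min? (pos.getD d PySem.Set.empty) (fun z => z)).map Int.toNat := by
  match hmin : PySem.List.min? (pos.getD d PySem.Set.empty) (fun z => z) with
  | none =>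
    have hs : pos.getD d PySem.Set.empty = [] := (PySem.List.min?_eq_none_iff _ _).mp hmin
    rw [Option.map_none]
    apply pv_find_range_none
    intro k hk
    rw [beq_eq_false_iff_ne]
    intro hkd
    have : (k : Int) ∈ pos.getD d PySem.Set.empty := by
      rw [hinv]
      refine ⟨by omega, by omega, by simpa using hkd⟩
    rw [hs] at this
    simp at this
  | some j =>
    have hjs : j ∈ pos.getD d PySem.Set.empty := PySem.List.min?_mem hmin
    obtain ⟨hj0, hjn, hjd⟩ := (hinv d j).mp hjs
    have hjm : ∀ z ∈ pos.getD d PySem.Set.empty, j ≤ z := PySem.List.min?_isMin hmin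
    rw [Option.map_some]
    apply pv_find_range_some
    · omega
    · simpa using hjd
    · intro k hk
      rw [beq_eq_false_iff_ne]
      intro hkd
      have hmem : (k : Int) ∈ pos.getD d PySem.Set.empty := by
        rw [hinv]
        exact ⟨by omega, by omega, by simpa using hkd⟩
      have := hjm _ hmem
      omega

-- one step of B's bookkeeping preserves the invariant w.r.t. A's doubly-set list
lemma pv_step_inv (pos : PySem.Dict Int (PySem.Set Int)) (l : List Int) (n : Int)
    (hinv : PvInv pos l n) (d j : Int) (hj0 : 0 ≤ j) (hjn : j < n)
    (hjd : l.getD j.toNat 0 = d) (hn : n ≤ (l.length : Int)) :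
    PvInv (if j < n - 1 then
            ((pos.insert d (PySem.Set.discard (pos.getD d PySem.Set.empty) j)).insert
                (l.getD (n-1).toNat 0)
                (PySem.Set.discard
                  (((pos.insert d (PySem.Set.discard (pos.getD d PySem.Set.empty) j)).getD
                    (l.getD (n-1).toNat 0) PySem.Set.empty)) (n-1))).insert
              (l.getD (n-1).toNat 0)
              (PySem.Set.add
                ((((pos.insert d (PySem.Set.discard (pos.getD d PySem.Set.empty) j)).insert
                    (l.getD (n-1).toNat 0)
                    (PySem.Set.discard
                      (((pos.insert d (PySem.Set.discard (pos.getD d PySem.Set.empty) j)).getD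
                        (l.getD (n-1).toNat 0) PySem.Set.empty)) (n-1))).getD
                  (l.getD (n-1).toNat 0) PySem.Set.empty)) j)
          else
            ((pos.insert d (PySem.Set.discard (pos.getD d PySem.Set.empty) j)).insert
                (l.getD (n-1).toNat 0)
                (PySem.Set.discard
                  (((pos.insert d (PySem.Set.discard (pos.getD d PySem.Set.empty) j)).getD
                    (l.getD (n-1).toNat 0) PySem.Set.empty)) (n-1))))
          ((l.set j.toNat (l.getD (n-1).toNat 0)).set (n-1).toNat d)
          (n - 1) := by
  set v := l.getD (n-1).toNat 0 with hv
  set pos1 := pos.insert d (PySem.Set.discard (pos.getD d PySem.Set.empty) j) with hpos1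
  set pos2 := pos1.insert v (PySem.Set.discard (pos1.getD v PySem.Set.empty) (n-1)) with hpos2
  have h1 : ∀ w k, k ∈ pos1.getD w PySem.Set.empty ↔
      (0 ≤ k ∧ k < n ∧ l.getD k.toNat 0 = w ∧ k ≠ j) := by
    intro w k
    rw [hpos1, PySem.Dict.getD_insert]
    split_ifs with hw
    · subst hw
      rw [PySem.Set.mem_discard, hinv]
      tauto
    · rw [hinv]
      constructor
      · rintro ⟨a, b, c⟩
        exact ⟨a, b, c, fun he => hw (by subst he; rw [← c, hjd])⟩
      · tauto
  have h2 : ∀ w k, k ∈ pos2.getD w PySem.Set.empty ↔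
      (0 ≤ k ∧ k < n ∧ l.getD k.toNat 0 = w ∧ k ≠ j ∧ k ≠ n-1) := by
    intro w k
    rw [hpos2, PySem.Dict.getD_insert]
    split_ifs with hw
    · subst hw
      rw [PySem.Set.mem_discard, h1]
      tauto
    · rw [h1]
      constructor
      · rintro ⟨a, b, c, e⟩
        refine ⟨a, b, c, e, fun he => hw ?_⟩
        subst he
        rw [← c, hv]
      · tauto
  have h3 : ∀ w k, k ∈ (if j < n - 1 then
        pos2.insert v (PySem.Set.add (pos2.getD v PySem.Set.empty) j) else pos2).getD w PySem.Set.empty ↔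
      ((0 ≤ k ∧ k < n ∧ l.getD k.toNat 0 = w ∧ k ≠ j ∧ k ≠ n-1) ∨ (j < n - 1 ∧ k = j ∧ w = v)) := by
    intro w k
    split_ifs with hjlt
    · rw [PySem.Dict.getD_insert]
      split_ifs with hw
      · subst hw
        rw [PySem.Set.mem_add, h2]
        constructor
        · rintro (h | rfl)
          · exact Or.inl h
          · exact Or.inr ⟨hjlt, rfl, rfl⟩
        · rintro (h | ⟨_, rfl, _⟩)
          · exact Or.inl h
          · exact Or.inr rfl
      · rw [h2]
        constructor
        · exact Or.inl
        · rintro (h | ⟨_, rfl, hwv⟩)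
          · exact h
          · exact absurd hwv hw
    · rw [h2]
      constructor
      · exact Or.inl
      · rintro (h | ⟨hlt, rfl, hwv⟩)
        · exact h
        · omega
  intro w k
  rw [h3]
  have hjlen : j.toNat < l.length := by omega
  have hnlen : (n-1).toNat < l.length := by omega
  have hget : ∀ k' : Int, 0 ≤ k' → k' < n - 1 →
      ((l.set j.toNat v).set (n-1).toNat d).getD k'.toNat 0 =
        if k' = j then v else l.getD k'.toNat 0 := by
    intro k' h0 hlt
    rw [List.getD_eq_getElem?_getD, List.getElem?_set_ne (by omega)]
    split_ifs with hk
    · subst hk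
      rw [List.getElem?_set_self (by omega)]
      rfl
    · rw [List.getElem?_set_ne (by omega), ← List.getD_eq_getElem?_getD]
  constructor
  · rintro (⟨a, b, c, e, f⟩ | ⟨hlt, hkj, hwv⟩)
    · have hb : k < n - 1 := by omega
      refine ⟨a, hb, ?_⟩
      rw [hget k a hb, if_neg e, c]
    · refine ⟨by omega, by omega, ?_⟩
      rw [hget k (by omega) (by omega), if_pos hkj, hwv]
  · rintro ⟨a, b, c⟩
    rw [hget k a b] at c
    by_cases hk : k = j
    · right
      rw [if_pos hk] at c
      exact ⟨by omega, hk, c.symm⟩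
    · left
      rw [if_neg hk] at c
      exact ⟨a, by omega, c, hk, by omega⟩

lemma pv_key (x : List Int) (y : Int) :
    ∀ (fuel i : Nat) (l : List Int) (n : Int) (pos : PySem.Dict Int (PySem.Set Int)),
      PvInv pos l n → n ≤ (l.length : Int) →
      pvGoA x y l n i fuel = pvGoB x y l n pos i fuel := by
  intro fuel
  induction fuel with
  | zero => intro i l n pos _ _; rfl
  | succ fuel ih =>
    intro i l n pos hinv hn
    show (match (List.range n.toNat).find? (fun j => l.getD j 0 == |x.getD i 0 - y|) with
      | none => (false, l)
      | some j => pvGoA x y ((l.set j (l.getD (n.toNat - 1) 0)).set (n.toNat - 1) (|x.getD i 0 - y|)) (n - 1) (i+1) fuel) = _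
    rw [pv_scan_eq_min pos l n hinv (|x.getD i 0 - y|)]
    cases hmin : PySem.List.min? (pos.getD (|x.getD i 0 - y|) PySem.Set.empty) (fun z => z) with
    | none =>
      have hs : pos.getD (|x.getD i 0 - y|) PySem.Set.empty = [] :=
        (PySem.List.min?_eq_none_iff _ _).mp hmin
      show (false, l) = pvGoB x y l n pos i (fuel+1)
      show (false, l) = (if pos.getD (|x.getD i 0 - y|) PySem.Set.empty = [] then ((false : Bool), l) else _)
      rw [if_pos hs]
    | some j =>
      have hjs : j ∈ pos.getD (|x.getD i 0 - y|) PySem.Set.empty := PySem.List.min?_mem hmin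
      obtain ⟨hj0, hjn, hjd⟩ := (hinv _ j).mp hjs
      have hne : pos.getD (|x.getD i 0 - y|) PySem.Set.empty ≠ [] := by
        intro h; rw [h] at hjs; simp at hjs
      show pvGoA x y ((l.set j.toNat (l.getD (n.toNat - 1) 0)).set (n.toNat - 1) (|x.getD i 0 - y|)) (n - 1) (i+1) fuel = pvGoB x y l n pos i (fuel+1)
      have hB : pvGoB x y l n pos i (fuel+1) =
          pvGoB x y ((l.set j.toNat (l.getD (n-1).toNat 0)).set (n-1).toNat (|x.getD i 0 - y|)) (n-1)
            (if j < n - 1 then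
              ((pos.insert (|x.getD i 0 - y|) (PySem.Set.discard (pos.getD (|x.getD i 0 - y|) PySem.Set.empty) j)).insert
                  (l.getD (n-1).toNat 0)
                  (PySem.Set.discard
                    (((pos.insert (|x.getD i 0 - y|) (PySem.Set.discard (pos.getD (|x.getD i 0 - y|) PySem.Set.empty) j)).getD
                      (l.getD (n-1).toNat 0) PySem.Set.empty)) (n-1))).insert
                (l.getD (n-1).toNat 0)
                (PySem.Set.add
                  ((((pos.insert (|x.getD i 0 - y|) (PySem.Set.discard (pos.getD (|x.getD i 0 - y|) PySem.Set.empty) j)).insert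
                      (l.getD (n-1).toNat 0)
                      (PySem.Set.discard
                        (((pos.insert (|x.getD i 0 - y|) (PySem.Set.discard (pos.getD (|x.getD i 0 - y|) PySem.Set.empty) j)).getD
                          (l.getD (n-1).toNat 0) PySem.Set.empty)) (n-1))).getD
                    (l.getD (n-1).toNat 0) PySem.Set.empty)) j)
            else
              ((pos.insert (|x.getD i 0 - y|) (PySem.Set.discard (pos.getD (|x.getD i 0 - y|) PySem.Set.empty) j)).insert
                  (l.getD (n-1).toNat 0)
                  (PySem.Set.discard
                    (((pos.insert (|x.getD i 0 - y|) (PySem.Set.discard (pos.getD (|x.getD i 0 - y|) PySem.Set.empty) j)).getD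
                      (l.getD (n-1).toNat 0) PySem.Set.empty)) (n-1)))) (i+1) fuel := by
        show (if pos.getD (|x.getD i 0 - y|) PySem.Set.empty = [] then ((false : Bool), l)
          else match PySem.List.min? (pos.getD (|x.getD i 0 - y|) PySem.Set.empty) (fun z => z) with
            | none => ((false : Bool), l)
            | some j => _) = _
        rw [if_neg hne, hmin]
      rw [hB]
      have hidx : (n-1).toNat = n.toNat - 1 := by omega
      rw [hidx]
      exact ih (i+1) _ (n-1) _ (by simpa [hidx] using pv_step_inv pos l n hinv (|x.getD i 0 - y|) j hj0 hjn hjd hn)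
        (by simp; omega)

-- ===== VERDICT (by name: the statement is the Claim_ definition above) =====
theorem find_distances_spec : Claim_equal_find_distances := by
  intro l_length l x_length x y _ hpre
  unfold Spec_find_distances find_distances find_distances_alt
  exact pv_key x y x_length.toNat 0 l l_length (pvBuildPos l l_length) (pv_build_inv l l_length) hpre.1
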